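-- pv_equiv track=rewrite | github.com/RileyLin/Data-Eng-Practice | solutions/python/q001_ride_overlapping.py | can_user_complete_rides
-- ===== SOURCE A (Python) =====
-- def can_user_complete_rides(requested_rides):
--     """
--     Checks if a list of ride requests (start_time, end_time) for a single user overlap.
--
--     Args:
--         requested_rides: A list of tuples, where each tuple is (start_time, end_time).
--                          Times are integers. Assumes end_time > start_time.
--
--     Returns:
--         True if no rides overlap, False otherwise.
--     """
--     # Edge case: if no rides, they can all be completed
--     if not requested_rides:
--         return True
--
--     # Sort rides by start time to process in chronological order
--     sorted_rides = sorted(requested_rides)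
--
--     # Keep track of the end time of the previous ride
--     prev_end_time = sorted_rides[0][1]
--
--     # Iterate through the remaining rides
--     for i in range(1, len(sorted_rides)):
--         current_start = sorted_rides[i][0]
--         current_end = sorted_rides[i][1]
--
--         # If current ride starts before previous ride ends, there's an overlap
--         if current_start < prev_end_time:
--             return False
--
--         # Update previous end time
--         prev_end_time = current_end
--
--     # All rides can be completed
--     return True
-- ===== SOURCE B (Python) =====
-- def can_user_complete_rides(requested_rides):
--     """Selection-based check: repeatedly extract the minimum remaining ride
--     (lexicographic, as Python's sorted/min order tuples) and compare its start
--     against the previously extracted ride's end. No sorting, no indexing."""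
--     remaining = list(requested_rides)
--     if not remaining:
--         return True
--     cur = min(remaining)
--     remaining.remove(cur)
--     while remaining:
--         nxt = min(remaining)
--         if nxt[0] < cur[1]:
--             return False
--         remaining.remove(nxt)
--         cur = nxt
--     return True
-- ===== Notes on version B (the rewrite author's own statement) =====
-- stated objective: alternative
-- what changed: Replaces sort-then-indexed-scan with a selection loop that repeatedly extracts the minimum remaining ride via min()/remove() and checks its start against the previous ride's end, with no sorting and no index arithmetic.
import Mathlib
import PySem

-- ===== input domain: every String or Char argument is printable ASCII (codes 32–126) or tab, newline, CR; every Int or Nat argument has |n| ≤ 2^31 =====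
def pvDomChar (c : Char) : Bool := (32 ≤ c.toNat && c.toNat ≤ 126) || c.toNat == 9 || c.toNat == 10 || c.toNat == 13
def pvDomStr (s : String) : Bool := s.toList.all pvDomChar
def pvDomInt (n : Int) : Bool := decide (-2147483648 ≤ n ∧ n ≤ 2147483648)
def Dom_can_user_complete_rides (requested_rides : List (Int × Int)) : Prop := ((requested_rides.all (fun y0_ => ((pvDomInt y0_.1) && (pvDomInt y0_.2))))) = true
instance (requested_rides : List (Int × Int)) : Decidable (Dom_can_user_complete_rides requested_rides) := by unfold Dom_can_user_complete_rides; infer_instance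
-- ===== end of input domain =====

-- B replaces A's sort-then-indexed-scan by a selection loop (repeated min + remove),
-- a different algorithm of the same behaviour (alternative; not faster).

-- ===== PORT A =====
-- the loop body: Python's early 'return False' is carried as the Bool flag in the state
-- (state = (still_ok, prev_end_time)); once the flag is false the state is unchanged.
def pvStepA (st : Bool × Int) (cur : Int × Int) : Bool × Int :=
  if st.1 = false then st
  else if cur.1 < st.2 then (false, st.2)
  else (true, cur.2)

def can_user_complete_rides (requested_rides : List (Int × Int)) : Bool :=
  -- if not requested_rides: return True
  if requested_rides = [] then true
  else
    -- sorted_rides = sorted(requested_rides)  (lexicographic tuple order)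
    let sorted_rides := PySem.List.sorted2 requested_rides (fun p => p.1) (fun p => p.2)
    -- prev_end_time = sorted_rides[0][1]  (index 0 in range: sorted_rides nonempty)
    let prev_end_time := (PySem.List.pyGetD sorted_rides 0 (0, 0)).2
    -- for i in range(1, len(sorted_rides)): …  (indices always in range, so pyGetD is exact)
    let st :=
      (PySem.List.pyRange 1 (sorted_rides.length : Int) 1).foldl
        (fun (st : Bool × Int) i => pvStepA st (PySem.List.pyGetD sorted_rides i (0, 0)))
        (true, prev_end_time)
    st.1

-- ===== PORT B =====
-- the lexicographic comparator min2?/sorted2 use for key₁ = fst, key₂ = snd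
def pvLt (a b : Int × Int) : Bool :=
  decide (a.1 < b.1) || !decide (b.1 < a.1) && decide (a.2 < b.2)

-- the fold step of min(list) for this element type (rfl-equal to min2?'s internal step)
def pvMinStep (acc : Option (Int × Int)) (x : Int × Int) : Option (Int × Int) :=
  match acc with
  | none => some x
  | some a => if pvLt x a then some x else some a

theorem pvMin2_eq_foldl (l : List (Int × Int)) :
    PySem.List.min2? l (fun p => p.1) (fun p => p.2) = l.foldl pvMinStep none := by
  unfold PySem.List.min2?
  congr 1
  funext acc x
  cases acc <;> rfl

-- termination helper for pvAltLoop: min(remaining) is an element of remaining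
theorem pvMinStep_foldl_mem (l : List (Int × Int)) :
    ∀ (acc : Option (Int × Int)) (m : Int × Int),
      l.foldl pvMinStep acc = some m → acc = some m ∨ m ∈ l := by
  induction l with
  | nil => intro acc m h; exact Or.inl h
  | cons x t ih =>
    intro acc m h
    rcases ih _ m h with h' | h'
    · cases acc with
      | none =>
        simp only [pvMinStep] at h'
        right; rw [Option.some_inj] at h'; simp [h']
      | some a =>
        simp only [pvMinStep] at h'
        split at h'
        · right; rw [Option.some_inj] at h'; simp [h']
        · left; exact h'
    · right; exact List.mem_cons_of_mem _ h'

theorem pvMin2_mem {l : List (Int × Int)} {m : Int × Int}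
    (h : PySem.List.min2? l (fun p => p.1) (fun p => p.2) = some m) : m ∈ l := by
  rw [pvMin2_eq_foldl] at h
  rcases pvMinStep_foldl_mem l none m h with h' | h'
  · cases h'
  · exact h'

-- while remaining: nxt = min(remaining); check; remaining.remove(nxt); cur = nxt
-- (list.remove of the minimum never raises — the element is present — and equals
--  List.erase by PySem.List.remove?_eq_some_erase)
def pvAltLoop (cur : Int × Int) (remaining : List (Int × Int)) : Bool :=
  match h : PySem.List.min2? remaining (fun p => p.1) (fun p => p.2) with
  | none => true
  | some nxt =>
    if nxt.1 < cur.2 then false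
    else pvAltLoop nxt (remaining.erase nxt)
termination_by remaining.length
decreasing_by
  have hmem := pvMin2_mem h
  have h1 := List.length_erase_of_mem hmem
  have h2 : remaining.length ≠ 0 := by
    rintro h0
    rw [List.length_eq_zero_iff] at h0; subst h0; simp at hmem
  omega

def can_user_complete_rides_alt (requested_rides : List (Int × Int)) : Bool :=
  -- remaining = list(requested_rides); if not remaining: return True  (min of [] is none)
  match PySem.List.min2? requested_rides (fun p => p.1) (fun p => p.2) with
  | none => true
  | some cur => pvAltLoop cur (requested_rides.erase cur)

-- ===== PRECONDITION & SPEC =====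
def Spec_can_user_complete_rides (requested_rides : List (Int × Int)) (out : Bool) : Prop := out = can_user_complete_rides_alt requested_rides
instance (requested_rides : List (Int × Int)) (out : Bool) : Decidable (Spec_can_user_complete_rides requested_rides out) := by unfold Spec_can_user_complete_rides; infer_instance

-- ===== CLAIM (what is proved, stated in full; the proofs are below) =====
def Claim_equal_can_user_complete_rides : Prop := ∀ (requested_rides : List (Int × Int)), Dom_can_user_complete_rides requested_rides → Spec_can_user_complete_rides requested_rides (can_user_complete_rides requested_rides)

-- ===== LEMMAS AND PROOFS =====

-- the lexicographic (non-strict) order on Int × Int, as a Prop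
def pvLexLe (a b : Int × Int) : Prop := a.1 < b.1 ∨ (a.1 = b.1 ∧ a.2 ≤ b.2)

theorem pvLexLe_of_lt {a b : Int × Int} (h : pvLt a b = true) : pvLexLe a b := by
  simp [pvLt] at h; unfold pvLexLe; omega

theorem pvLexLe_of_not_lt {a b : Int × Int} (h : pvLt a b = false) : pvLexLe b a := by
  simp [pvLt] at h; unfold pvLexLe; omega

theorem pvLexLe_refl (a : Int × Int) : pvLexLe a a := by unfold pvLexLe; omega

theorem pvLexLe_trans {a b c : Int × Int} (h1 : pvLexLe a b) (h2 : pvLexLe b c) :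
    pvLexLe a c := by unfold pvLexLe at *; omega

theorem pvLexLe_antisymm {a b : Int × Int} (h1 : pvLexLe a b) (h2 : pvLexLe b a) :
    a = b := by
  unfold pvLexLe at *
  have : a.1 = b.1 ∧ a.2 = b.2 := by omega
  exact Prod.ext this.1 this.2

-- min2? returns a lower bound (wrt pvLexLe) of the list and of the accumulator
theorem pvMinStep_foldl_isMin (l : List (Int × Int)) :
    ∀ (acc : Option (Int × Int)) (m : Int × Int),
      l.foldl pvMinStep acc = some m →
      (∀ y ∈ l, pvLexLe m y) ∧ (∀ a, acc = some a → pvLexLe m a) := by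
  induction l with
  | nil =>
    intro acc m h
    simp only [List.foldl_nil] at h
    refine ⟨by simp, fun a ha => ?_⟩
    rw [h] at ha; rw [Option.some_inj] at ha; subst ha; exact pvLexLe_refl m
  | cons x t ih =>
    intro acc m h
    simp only [List.foldl_cons] at h
    obtain ⟨ht, hacc⟩ := ih _ m h
    have hstep : ∀ b, pvMinStep acc x = some b → pvLexLe b x ∧ (∀ a, acc = some a → pvLexLe b a) := by
      intro b hb
      cases acc with
      | none =>
        simp only [pvMinStep, Option.some_inj] at hb; subst hb
        exact ⟨pvLexLe_refl x, by simp⟩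
      | some a =>
        simp only [pvMinStep] at hb
        by_cases hlt : pvLt x a = true
        · rw [if_pos hlt, Option.some_inj] at hb; subst hb
          exact ⟨pvLexLe_refl x, fun c hc => by
            rw [Option.some_inj] at hc; subst hc; exact pvLexLe_of_lt hlt⟩
        · rw [if_neg hlt, Option.some_inj] at hb; subst hb
          refine ⟨pvLexLe_of_not_lt (by simpa using hlt), fun c hc => ?_⟩
          rw [Option.some_inj] at hc; subst hc; exact pvLexLe_refl _
    have hb : ∃ b, pvMinStep acc x = some b := by
      cases acc with
      | none => exact ⟨x, rfl⟩
      | some a =>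
        simp only [pvMinStep]
        by_cases hlt : pvLt x a = true
        · exact ⟨x, if_pos hlt⟩
        · exact ⟨a, if_neg hlt⟩
    obtain ⟨b, hbeq⟩ := hb
    obtain ⟨hbx, hba⟩ := hstep b hbeq
    have hmb : pvLexLe m b := hacc b hbeq
    refine ⟨fun y hy => ?_, fun a ha => pvLexLe_trans hmb (hba a ha)⟩
    rcases List.mem_cons.1 hy with rfl | hy
    · exact pvLexLe_trans hmb hbx
    · exact ht y hy

theorem pvMin2_isMin {l : List (Int × Int)} {m : Int × Int}
    (h : PySem.List.min2? l (fun p => p.1) (fun p => p.2) = some m) :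
    ∀ y ∈ l, pvLexLe m y := by
  rw [pvMin2_eq_foldl] at h
  exact (pvMinStep_foldl_isMin l none m h).1

theorem pvMinStep_foldl_isSome (t : List (Int × Int)) :
    ∀ a : Int × Int, (t.foldl pvMinStep (some a)).isSome := by
  induction t with
  | nil => intro a; rfl
  | cons x t ih =>
    intro a
    simp only [List.foldl_cons, pvMinStep]
    by_cases hlt : pvLt x a = true
    · rw [if_pos hlt]; exact ih x
    · rw [if_neg hlt]; exact ih a

theorem pvMin2_eq_none_iff (l : List (Int × Int)) :
    PySem.List.min2? l (fun p => p.1) (fun p => p.2) = none ↔ l = [] := by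
  rw [pvMin2_eq_foldl]
  cases l with
  | nil => simp
  | cons x t =>
    simp only [List.foldl_cons]
    constructor
    · intro h
      have := pvMinStep_foldl_isSome t x
      rw [show pvMinStep none x = some x from rfl] at h
      rw [h] at this; cases this
    · intro h; cases h

-- sorted2 (key₁ = fst, key₂ = snd) is the insertBy-fold with comparator pvLt
theorem pvSorted2_eq_foldl (l : List (Int × Int)) :
    PySem.List.sorted2 l (fun p => p.1) (fun p => p.2) =
      l.foldl (fun acc x => PySem.List.insertBy pvLt x acc) [] := rfl

theorem pvInsertBy_nil (x : Int × Int) : PySem.List.insertBy pvLt x [] = [x] := rfl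

theorem pvInsertBy_cons (x y : Int × Int) (ys : List (Int × Int)) :
    PySem.List.insertBy pvLt x (y :: ys) =
      if pvLt x y then x :: y :: ys else y :: PySem.List.insertBy pvLt x ys := rfl

theorem pvInsertBy_pairwise (x : Int × Int) (ys : List (Int × Int))
    (h : ys.Pairwise pvLexLe) : (PySem.List.insertBy pvLt x ys).Pairwise pvLexLe := by
  induction ys with
  | nil => rw [pvInsertBy_nil]; simp
  | cons y ys ih =>
    rw [pvInsertBy_cons]
    rcases List.pairwise_cons.1 h with ⟨hy, hys⟩
    by_cases hxy : pvLt x y = true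
    · rw [if_pos hxy]
      refine List.pairwise_cons.2 ⟨?_, h⟩
      intro z hz
      rcases List.mem_cons.1 hz with rfl | hz
      · exact pvLexLe_of_lt hxy
      · exact pvLexLe_trans (pvLexLe_of_lt hxy) (hy z hz)
    · rw [if_neg hxy]
      refine List.pairwise_cons.2 ⟨?_, ih hys⟩
      intro z hz
      rcases (PySem.List.mem_insertBy pvLt x z ys).1 hz with rfl | hz
      · exact pvLexLe_of_not_lt (by simpa using hxy)
      · exact hy z hz

theorem pvSorted2_pairwise_aux (l : List (Int × Int)) :
    ∀ acc : List (Int × Int), acc.Pairwise pvLexLe →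
      (l.foldl (fun acc x => PySem.List.insertBy pvLt x acc) acc).Pairwise pvLexLe := by
  induction l with
  | nil => intro acc h; simpa using h
  | cons x t ih =>
    intro acc h
    simp only [List.foldl_cons]
    exact ih _ (pvInsertBy_pairwise x acc h)

theorem pvSorted2_pairwise (l : List (Int × Int)) :
    (PySem.List.sorted2 l (fun p => p.1) (fun p => p.2)).Pairwise pvLexLe := by
  rw [pvSorted2_eq_foldl]
  exact pvSorted2_pairwise_aux l [] (by simp)

-- head-tail decomposition of sorted2: sorted(l) = min(l) :: sorted(l with min removed)
theorem pvSorted2_cons_min {l : List (Int × Int)} {m : Int × Int}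
    (h : PySem.List.min2? l (fun p => p.1) (fun p => p.2) = some m) :
    PySem.List.sorted2 l (fun p => p.1) (fun p => p.2) =
      m :: PySem.List.sorted2 (l.erase m) (fun p => p.1) (fun p => p.2) := by
  have hmem : m ∈ l := pvMin2_mem h
  have hmin := pvMin2_isMin h
  have hperm : (PySem.List.sorted2 l (fun p => p.1) (fun p => p.2)).Perm
      (m :: PySem.List.sorted2 (l.erase m) (fun p => p.1) (fun p => p.2)) := by
    refine ((PySem.List.sorted2_perm l _ _ false).trans (List.perm_cons_erase hmem)).trans ?_
    exact List.Perm.cons m (PySem.List.sorted2_perm (l.erase m) _ _ false).symm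
  refine List.eq_of_perm_of_sorted (fun a b _ _ hab hba => pvLexLe_antisymm hab hba)
    (pvSorted2_pairwise l) ?_ hperm
  refine List.pairwise_cons.2 ⟨?_, pvSorted2_pairwise (l.erase m)⟩
  intro y hy
  have : y ∈ l.erase m :=
    ((PySem.List.sorted2_perm (l.erase m) _ _ false).mem_iff).1 hy
  exact hmin y (List.mem_of_mem_erase this)

-- the adjacency check on an already sorted tail, as a plain recursion
def pvChain (prevEnd : Int) : List (Int × Int) → Bool
  | [] => true
  | x :: t => if x.1 < prevEnd then false else pvChain x.2 t

theorem pvStepA_false (p : Int) (x : Int × Int) : pvStepA (false, p) x = (false, p) := by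
  simp [pvStepA]

theorem pvStepA_true_lt {p : Int} {x : Int × Int} (h : x.1 < p) :
    pvStepA (true, p) x = (false, p) := by
  simp [pvStepA, h]

theorem pvStepA_true_ge {p : Int} {x : Int × Int} (h : ¬ x.1 < p) :
    pvStepA (true, p) x = (true, x.2) := by
  simp [pvStepA, h]

theorem pvFoldl_false (t : List (Int × Int)) (p : Int) :
    t.foldl pvStepA (false, p) = (false, p) := by
  induction t with
  | nil => rfl
  | cons x t ih => rw [List.foldl_cons, pvStepA_false]; exact ih

theorem pvFoldl_eq_chain (t : List (Int × Int)) :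
    ∀ p : Int, (t.foldl pvStepA (true, p)).1 = pvChain p t := by
  induction t with
  | nil => intro p; rfl
  | cons x t ih =>
    intro p
    rw [List.foldl_cons]
    by_cases hx : x.1 < p
    · rw [pvStepA_true_lt hx, pvFoldl_false]
      simp [pvChain, hx]
    · rw [pvStepA_true_ge hx]
      simp only [pvChain, if_neg hx]
      exact ih x.2

-- B's selection loop computes the adjacency check on the sorted remainder
theorem pvAltLoop_eq_chain (rem : List (Int × Int)) (cur : Int × Int) :
    pvAltLoop cur rem = pvChain cur.2 (PySem.List.sorted2 rem (fun p => p.1) (fun p => p.2)) := by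
  induction hn : rem.length using Nat.strong_induction_on generalizing rem cur with
  | _ n ih =>
    rw [pvAltLoop]
    cases hmin : PySem.List.min2? rem (fun p => p.1) (fun p => p.2) with
    | none =>
      have : rem = [] := (pvMin2_eq_none_iff rem).1 hmin
      subst this; rfl
    | some nxt =>
      rw [pvSorted2_cons_min hmin]
      simp only [pvChain]
      by_cases hlt : nxt.1 < cur.2
      · simp [hlt]
      · simp only [if_neg hlt]
        subst hn
        refine ih _ ?_ _ _ rfl
        have hmem := pvMin2_mem hmin
        have h1 := List.length_erase_of_mem hmem
        have h2 : rem.length ≠ 0 := by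
          rintro h0
          rw [List.length_eq_zero_iff] at h0; subst h0; simp at hmem
        omega

-- ===== VERDICT (by name: the statement is the Claim_ definition above) =====
theorem can_user_complete_rides_spec : Claim_equal_can_user_complete_rides := by
  intro l _
  unfold Spec_can_user_complete_rides can_user_complete_rides can_user_complete_rides_alt
  cases hmin : PySem.List.min2? l (fun p => p.1) (fun p => p.2) with
  | none =>
    have : l = [] := (pvMin2_eq_none_iff l).1 hmin
    subst this; rfl
  | some m =>
    have hne : l ≠ [] := by
      intro h; subst h; simp [PySem.List.min2?] at hmin
    simp only [if_neg hne]
    rw [pvSorted2_cons_min hmin]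
    set s' := PySem.List.sorted2 (l.erase m) (fun p => p.1) (fun p => p.2) with hs'
    rw [PySem.List.foldl_pyRange_pyGetD' (m :: s') (0,0) pvStepA _ (by norm_num : (0:Int) ≤ 1)]
    simp only [PySem.List.pyGetD_zero_cons, Int.toNat_one, List.drop_one, List.tail_cons]
    rw [pvFoldl_eq_chain]
    exact (pvAltLoop_eq_chain (l.erase m) m).symm
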